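-- pv_equiv track=rewrite | github.com/Bharadwaja92/CompetitiveCoding | HackerEarth/CodeArena/RickWhiteWalkers.py | findRickFate
-- ===== SOURCE A (Python) =====
-- def findRickFate(n, l1):
--     c = 0
--     l1 = sorted(l1)
--     while len(l1) > 0:
--         if 0 in l1:
--             return 'Goodbye Rick\n'+str(n-len(l1))
--         l1.remove(l1[0])
--         l1 = [x-1 for x in l1]
--         c += 1
--         if c == 6:
--             l1 = [x - 1 for x in l1]
--             c = 0
--     return 'Rick now go and save Carl and Judas'
-- ===== SOURCE B (Python) =====
-- def findRickFate(n, l1):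
--     # Sort once; the k-th loop iteration of the simulation sees the suffix s[k:]
--     # decremented by k + k//6, so a hit at step k means k + k//6 occurs in s at
--     # an index >= k.  A dict of last occurrence indices answers that in O(1).
--     s = sorted(l1)
--     last = {v: i for i, v in enumerate(s)}
--     m = len(s)
--     for k in range(m):
--         d = k + k // 6
--         if d in last and last[d] >= k:
--             return 'Goodbye Rick\n' + str(n - (m - k))
--     return 'Rick now go and save Carl and Judas'
-- ===== Notes on version B (the rewrite author's own statement) =====
-- stated objective: faster
-- what changed: Replaces the O(n^2) step-by-step simulation (remove head, decrement every remaining element each round) by sort + one dict of last occurrence indices + a single O(n) scan over step numbers k testing whether k + k//6 occurs in the sorted list at index >= k.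
import Mathlib
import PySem

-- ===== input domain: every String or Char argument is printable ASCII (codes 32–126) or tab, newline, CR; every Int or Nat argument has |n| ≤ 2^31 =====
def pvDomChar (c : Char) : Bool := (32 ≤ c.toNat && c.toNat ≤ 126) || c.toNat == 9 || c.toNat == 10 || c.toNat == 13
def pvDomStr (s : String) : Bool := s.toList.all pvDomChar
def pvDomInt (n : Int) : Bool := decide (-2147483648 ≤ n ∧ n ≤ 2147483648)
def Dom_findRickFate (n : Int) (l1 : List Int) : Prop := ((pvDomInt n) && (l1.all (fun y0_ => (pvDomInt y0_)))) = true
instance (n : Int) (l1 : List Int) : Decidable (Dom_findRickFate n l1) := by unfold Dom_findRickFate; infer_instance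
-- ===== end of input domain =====

-- B replaces A's quadratic decrement-and-remove simulation by sort + last-occurrence dict + one linear scan (faster, asymptotic).


-- ===== PORT A =====
-- the while-loop of A: state (l1, c); each iteration removes l1[0] and decrements the rest (twice when c hits 6)
def findRickFateLoop (n : Int) : List Int → Int → String
  | [], _ => "Rick now go and save Carl and Judas"
  | a :: t, c =>
    if (0 : Int) ∈ a :: t then
      "Goodbye Rick\n" ++ PySem.Int.toStr (n - ((a :: t).length : Int))
    else
      -- l1.remove(l1[0]); l1 = [x-1 for x in l1]
      let l2 := ((PySem.List.remove? (a :: t) a).getD []).map (fun x => x - 1)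
      if c + 1 = 6 then findRickFateLoop n (l2.map (fun x => x - 1)) 0
      else findRickFateLoop n l2 (c + 1)
  termination_by l _ => l.length
  decreasing_by all_goals simp [PySem.List.remove?_cons_self]

def findRickFate (n : Int) (l1 : List Int) : String :=
  findRickFateLoop n (PySem.List.sorted l1 (fun x => x) false) 0

-- ===== PORT B =====
-- last = {v: i for i, v in enumerate(s)}
def findRickFateLast (s : List Int) : PySem.Dict Int Int :=
  (PySem.List.enumerate s).foldl (fun d p => d.insert p.2 p.1) PySem.Dict.empty

-- for k in range(m): d = k + k//6; if d in last and last[d] >= k: return …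
def findRickFateScan (n : Int) (last : PySem.Dict Int Int) (m : Nat) (k : Nat) : String :=
  if k < m then
    let d : Int := (k : Int) + PySem.Int.floordiv (k : Int) 6
    match last.get? d with
    | some i =>
      if (k : Int) ≤ i then "Goodbye Rick\n" ++ PySem.Int.toStr (n - ((m : Int) - (k : Int)))
      else findRickFateScan n last m (k + 1)
    | none => findRickFateScan n last m (k + 1)
  else "Rick now go and save Carl and Judas"
  termination_by m - k

def findRickFate_alt (n : Int) (l1 : List Int) : String :=
  let s := PySem.List.sorted l1 (fun x => x) false
  findRickFateScan n (findRickFateLast s) s.length 0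

-- ===== PRECONDITION & SPEC =====
def Spec_findRickFate (n : Int) (l1 : List Int) (out : String) : Prop := out = findRickFate_alt n l1
instance (n : Int) (l1 : List Int) (out : String) : Decidable (Spec_findRickFate n l1 out) := by unfold Spec_findRickFate; infer_instance

-- ===== CLAIM (what is proved, stated in full; the proofs are below) =====
def Claim_equal_findRickFate : Prop := ∀ (n : Int) (l1 : List Int), Dom_findRickFate n l1 → Spec_findRickFate n l1 (findRickFate n l1)

-- ===== LEMMAS AND PROOFS =====

-- reference form of A's loop: the untouched suffix together with the accumulated offset and the counter
def rickRef (n : Int) : List Int → Int → Int → String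
  | [], _, _ => "Rick now go and save Carl and Judas"
  | a :: t, off, c =>
    if off ∈ a :: t then "Goodbye Rick\n" ++ PySem.Int.toStr (n - ((a :: t).length : Int))
    else rickRef n t (off + (if c + 1 = 6 then 2 else 1)) (if c + 1 = 6 then 0 else c + 1)

theorem rickLoop_eq_ref (n : Int) : ∀ (t : List Int) (off c : Int),
    findRickFateLoop n (t.map (fun x => x - off)) c = rickRef n t off c := by
  intro t
  induction t with
  | nil => intro off c; simp [findRickFateLoop, rickRef]
  | cons a t ih =>
    intro off c
    have hmem : ((0 : Int) ∈ (a - off) :: t.map (fun x => x - off)) ↔ off ∈ a :: t := by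
      constructor
      · intro h
        rcases List.mem_cons.mp h with h0 | hm
        · exact List.mem_cons.mpr (Or.inl (by omega))
        · rcases List.mem_map.mp hm with ⟨x, hx, he⟩
          have hxo : x = off := by omega
          exact List.mem_cons.mpr (Or.inr (hxo ▸ hx))
      · intro h
        rcases List.mem_cons.mp h with h0 | hm
        · exact List.mem_cons.mpr (Or.inl (by omega))
        · exact List.mem_cons.mpr (Or.inr (List.mem_map.mpr ⟨off, hm, by ring⟩))
    have hmap1 : (t.map (fun x => x - off)).map (fun x => x - 1)
        = t.map (fun x => x - (off + 1)) := by
      rw [List.map_map]; congr 1; funext x; simp only [Function.comp]; ring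
    have hmap2 : (t.map (fun x => x - (off + 1))).map (fun x => x - 1)
        = t.map (fun x => x - (off + 2)) := by
      rw [List.map_map]; congr 1; funext x; simp only [Function.comp]; ring
    rw [show (a :: t).map (fun x => x - off) = (a - off) :: t.map (fun x => x - off) from rfl]
    rw [findRickFateLoop, rickRef]
    simp only [PySem.List.remove?_cons_self, Option.getD_some]
    by_cases h : off ∈ a :: t
    · rw [if_pos (hmem.mpr h), if_pos h]
      simp
    · rw [if_neg (fun hm => h (hmem.mp hm)), if_neg h]
      by_cases hc : c + 1 = 6
      · rw [if_pos hc, if_pos hc, if_pos hc, hmap1, hmap2]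
        exact ih (off + 2) 0
      · rw [if_neg hc, if_neg hc, if_neg hc, hmap1]
        exact ih (off + 1) (c + 1)

-- index of the LAST occurrence of v in s (none if absent)
def rickLastNat? : List Int → Int → Option Nat
  | [], _ => none
  | a :: t, v =>
    match rickLastNat? t v with
    | some k => some (k + 1)
    | none => if a = v then some 0 else none

theorem rickLastNat?_eq_none (s : List Int) (v : Int) :
    rickLastNat? s v = none ↔ v ∉ s := by
  induction s with
  | nil => simp [rickLastNat?]
  | cons a t ih =>
    rw [rickLastNat?]
    cases h : rickLastNat? t v with
    | some k =>
      simp only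
      constructor
      · intro hc; simp at hc
      · intro hv
        exfalso
        have hvt : v ∈ t := by
          by_contra hvt
          rw [ih.mpr hvt] at h; simp at h
        exact hv (List.mem_cons.mpr (Or.inr hvt))
    | none =>
      have hvt : v ∉ t := ih.mp h
      by_cases ha : a = v
      · constructor
        · intro hc; simp [ha] at hc
        · intro hv; exact absurd (List.mem_cons.mpr (Or.inl ha.symm)) hv
      · rw [if_neg ha]
        constructor
        · intro _ hv
          rcases List.mem_cons.mp hv with h0 | hm
          · exact ha h0.symm
          · exact hvt hm
        · intro _; rfl

-- generic last-pair lookup produced by a foldl of inserts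
def rickLastPair? : List (Int × Int) → Int → Option Int
  | [], _ => none
  | p :: r, v =>
    match rickLastPair? r v with
    | some i => some i
    | none => if p.2 = v then some p.1 else none

theorem get?_foldl_insert (l : List (Int × Int)) (d : PySem.Dict Int Int) (v : Int) :
    (l.foldl (fun d p => d.insert p.2 p.1) d).get? v =
      match rickLastPair? l v with
      | some i => some i
      | none => d.get? v := by
  induction l generalizing d with
  | nil => simp [rickLastPair?]
  | cons p r ih =>
    rw [List.foldl_cons, ih, rickLastPair?]
    cases h : rickLastPair? r v with
    | some i => simp
    | none =>
      simp only
      by_cases hp : p.2 = v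
      · subst hp; simp [PySem.Dict.get?_insert_self]
      · rw [if_neg hp]
        simp only
        rw [PySem.Dict.get?_insert, if_neg (fun hvp => hp hvp.symm)]

theorem rickLastPair?_enumerate (s : List Int) (v : Int) : ∀ (i0 : Int),
    rickLastPair? (PySem.List.enumerate s i0) v
      = (rickLastNat? s v).map (fun k => i0 + (k : Int)) := by
  induction s with
  | nil => intro i0; simp [PySem.List.enumerate_nil, rickLastPair?, rickLastNat?]
  | cons a t ih =>
    intro i0
    rw [PySem.List.enumerate_cons, rickLastPair?, rickLastNat?, ih (i0 + 1)]
    cases h : rickLastNat? t v with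
    | some k => simp; ring
    | none => by_cases ha : a = v <;> simp [ha]

theorem rickLast_get? (s : List Int) (v : Int) :
    (findRickFateLast s).get? v
      = Option.map (fun k : Nat => (k : Int)) (rickLastNat? s v) := by
  rw [findRickFateLast, get?_foldl_insert, rickLastPair?_enumerate]
  cases rickLastNat? s v <;> simp [PySem.Dict.get?_empty]

theorem mem_drop_iff_last (s : List Int) (v : Int) : ∀ (k : Nat),
    v ∈ s.drop k ↔ ∃ j, rickLastNat? s v = some j ∧ k ≤ j := by
  induction s with
  | nil => intro k; simp [rickLastNat?]
  | cons a t ih =>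
    intro k
    cases k with
    | zero =>
      simp only [List.drop_zero]
      constructor
      · intro hv
        cases h : rickLastNat? (a :: t) v with
        | some j => exact ⟨j, rfl, Nat.zero_le j⟩
        | none => exact absurd hv ((rickLastNat?_eq_none _ _).mp h)
      · rintro ⟨j, hj, -⟩
        by_contra hv
        rw [(rickLastNat?_eq_none (a :: t) v).mpr hv] at hj
        simp at hj
    | succ k' =>
      rw [List.drop_succ_cons, ih k', rickLastNat?]
      cases h : rickLastNat? t v with
      | some j' =>
        simp only
        constructor
        · rintro ⟨j, hj, hk⟩
          cases hj
          exact ⟨j' + 1, rfl, by omega⟩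
        · rintro ⟨j, hj, hk⟩
          cases hj
          exact ⟨j', rfl, by omega⟩
      | none =>
        simp only
        constructor
        · rintro ⟨j, hj, -⟩; simp at hj
        · rintro ⟨j, hj, hk⟩
          by_cases ha : a = v
          · rw [if_pos ha] at hj
            cases hj
            exact absurd hk (by omega)
          · rw [if_neg ha] at hj
            simp at hj

theorem ref_eq_scan (n : Int) (s : List Int) : ∀ (fuel k : Nat), s.length = k + fuel →
    rickRef n (s.drop k) ((k : Int) + PySem.Int.floordiv (k : Int) 6) ((k % 6 : Nat) : Int)
      = findRickFateScan n (findRickFateLast s) s.length k := by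
  intro fuel
  induction fuel with
  | zero =>
    intro k hk
    rw [List.drop_of_length_le (by omega), findRickFateScan]
    simp [rickRef, hk]
  | succ f ih =>
    intro k hk
    have hklt : k < s.length := by omega
    have hdrop : s.drop k = s[k] :: s.drop (k + 1) := List.drop_eq_getElem_cons hklt
    have hfloor : PySem.Int.floordiv (k : Int) 6 = ((k / 6 : Nat) : Int) :=
      PySem.Int.floordiv_natCast k 6
    have hfloor1 : PySem.Int.floordiv (((k + 1 : Nat) : Int)) 6 = (((k + 1) / 6 : Nat) : Int) :=
      PySem.Int.floordiv_natCast (k + 1) 6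
    have hiff : (((k % 6 : Nat) : Int) + 1 = 6) ↔ k % 6 = 5 := by omega
    have hoff : ((k + 1 : Nat) : Int) + PySem.Int.floordiv (((k + 1 : Nat) : Int)) 6
        = ((k : Int) + PySem.Int.floordiv (k : Int) 6)
          + (if ((k % 6 : Nat) : Int) + 1 = 6 then 2 else 1) := by
      rw [hfloor1, hfloor]
      by_cases hm5 : k % 6 = 5
      · rw [if_pos (hiff.mpr hm5)]; omega
      · rw [if_neg (fun hh => hm5 (hiff.mp hh))]; omega
    have hc6 : (((k + 1) % 6 : Nat) : Int)
        = (if ((k % 6 : Nat) : Int) + 1 = 6 then 0 else ((k % 6 : Nat) : Int) + 1) := by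
      by_cases hm5 : k % 6 = 5
      · rw [if_pos (hiff.mpr hm5)]; omega
      · rw [if_neg (fun hh => hm5 (hiff.mp hh))]; omega
    rw [findRickFateScan, if_pos hklt]
    simp only [rickLast_get?]
    split
    · rename_i i heq
      cases hn : rickLastNat? s ((k : Int) + PySem.Int.floordiv (k : Int) 6) with
      | none => rw [hn] at heq; simp at heq
      | some j =>
        rw [hn] at heq
        simp only [Option.map_some, Option.some.injEq] at heq
        subst heq
        by_cases hkj : k ≤ j
        · have hm : ((k : Int) + PySem.Int.floordiv (k : Int) 6) ∈ s.drop k :=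
            (mem_drop_iff_last s _ k).mpr ⟨j, hn, hkj⟩
          rw [hdrop, rickRef, ← hdrop, if_pos hm,
            if_pos (show (k : Int) ≤ (j : Int) from by exact_mod_cast hkj)]
          congr 2
          rw [List.length_drop]
          omega
        · have hm : ((k : Int) + PySem.Int.floordiv (k : Int) 6) ∉ s.drop k := by
            intro hmm
            rcases (mem_drop_iff_last s _ k).mp hmm with ⟨j2, hj2, hkj2⟩
            rw [hn] at hj2
            cases hj2
            exact hkj hkj2
          rw [hdrop, rickRef, ← hdrop, if_neg hm,
            if_neg (show ¬ (k : Int) ≤ (j : Int) from by exact_mod_cast hkj),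
            ← ih (k + 1) (by omega), hoff, hc6]
    · rename_i heq
      cases hn : rickLastNat? s ((k : Int) + PySem.Int.floordiv (k : Int) 6) with
      | some j => rw [hn] at heq; simp at heq
      | none =>
        have hm : ((k : Int) + PySem.Int.floordiv (k : Int) 6) ∉ s.drop k := by
          intro hmm
          rcases (mem_drop_iff_last s _ k).mp hmm with ⟨j2, hj2, -⟩
          rw [hn] at hj2
          simp at hj2
        rw [hdrop, rickRef, ← hdrop, if_neg hm, ← ih (k + 1) (by omega), hoff, hc6]

-- ===== VERDICT (by name: the statement is the Claim_ definition above) =====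
theorem findRickFate_spec : Claim_equal_findRickFate := by
  unfold Claim_equal_findRickFate
  intro n l1 _
  unfold Spec_findRickFate findRickFate findRickFate_alt
  set s := PySem.List.sorted l1 (fun x => x) false with hs
  have h0 : s.map (fun x => x - 0) = s := by simp
  have h1 := rickLoop_eq_ref n s 0 0
  rw [h0] at h1
  rw [h1]
  have h2 := ref_eq_scan n s s.length 0 (by omega)
  simpa [PySem.Int.floordiv] using h2
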